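-- pv_equiv track=rewrite | github.com/NinhGhoster/World-Fire-Propagation-Map | modules/mff_integration.py | check_grid_pattern
-- ===== SOURCE A (Python) =====
-- def check_grid_pattern(adjacency_matrix, rows, cols):
--     """Check if the adjacency matrix matches a grid pattern."""
--     n = rows * cols
--     if n != len(adjacency_matrix):
--         return False
--
--     # Check grid connections
--     for i in range(rows):
--         for j in range(cols):
--             node = i * cols + j
--
--             # Expected neighbors in a grid
--             expected_neighbors = []
--             if i > 0:  # up
--                 expected_neighbors.append((i-1) * cols + j)
--             if i < rows - 1:  # down
--                 expected_neighbors.append((i+1) * cols + j)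
--             if j > 0:  # left
--                 expected_neighbors.append(i * cols + (j-1))
--             if j < cols - 1:  # right
--                 expected_neighbors.append(i * cols + (j+1))
--
--             # Check if actual neighbors match expected
--             actual_neighbors = [k for k in range(n) if adjacency_matrix[node][k] == 1]
--
--             if set(actual_neighbors) != set(expected_neighbors):
--                 return False
--
--     return True
-- ===== SOURCE B (Python) =====
-- def check_grid_pattern(adjacency_matrix, rows, cols):
--     """Check if the adjacency matrix matches a grid pattern."""
--     n = rows * cols
--     if n != len(adjacency_matrix):
--         return False
--     for a in range(n):
--         ra, ca = a // cols, a % cols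
--         row = adjacency_matrix[a]
--         for b in range(n):
--             rb, cb = b // cols, b % cols
--             if (row[b] == 1) != (abs(ra - rb) + abs(ca - cb) == 1):
--                 return False
--     return True
-- ===== Notes on version B (the rewrite author's own statement) =====
-- stated objective: alternative
-- what changed: B drops A's per-node expected-neighbor list construction and set comparison entirely: it decodes each pair of node indices back to grid coordinates with divmod and checks every matrix cell against the closed-form grid-adjacency predicate (Manhattan distance 1), returning False at the first mismatching cell.
-- outside the precondition, e.g. on check_grid_pattern([[1, 1], [0]], 1, 2): A returns False, B returns False; on check_grid_pattern([[1, 1], [1, 1]], -1, -2): A returns True, B returns False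
import Mathlib
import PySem

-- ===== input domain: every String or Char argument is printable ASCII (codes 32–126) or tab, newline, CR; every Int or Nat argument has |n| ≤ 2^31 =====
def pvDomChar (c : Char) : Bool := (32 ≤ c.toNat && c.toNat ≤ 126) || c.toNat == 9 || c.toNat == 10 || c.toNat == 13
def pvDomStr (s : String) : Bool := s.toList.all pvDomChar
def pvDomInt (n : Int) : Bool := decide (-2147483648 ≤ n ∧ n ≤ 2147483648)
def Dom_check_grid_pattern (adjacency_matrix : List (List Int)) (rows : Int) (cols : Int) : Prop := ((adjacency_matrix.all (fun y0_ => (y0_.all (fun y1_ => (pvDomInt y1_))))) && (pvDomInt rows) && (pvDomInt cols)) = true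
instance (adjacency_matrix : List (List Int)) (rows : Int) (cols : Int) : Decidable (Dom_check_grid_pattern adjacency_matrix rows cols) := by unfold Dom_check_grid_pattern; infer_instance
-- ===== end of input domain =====

-- B replaces A's per-node expected-neighbor lists and set comparisons by a cell-by-cell check of
-- every matrix entry against the closed-form grid-adjacency predicate (decode both node indices
-- with divmod, adjacent iff Manhattan distance 1); objective: alternative decomposition.

-- ===== PORT A =====
-- A's expected_neighbors list (the four conditional appends)
def cgpA_expected (rows cols i j : Int) : List Int :=
  (if i > 0 then [(i - 1) * cols + j] else []) ++
  (if i < rows - 1 then [(i + 1) * cols + j] else []) ++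
  (if j > 0 then [i * cols + (j - 1)] else []) ++
  (if j < cols - 1 then [i * cols + (j + 1)] else [])

-- per-node check of A: collect actual_neighbors, compare with expected as sets
def cgpA_node (adjacency_matrix : List (List Int)) (rows : Int) (cols : Int) (i j : Int) : Bool :=
  let n := rows * cols
  let node := i * cols + j
  let actual_neighbors : List Int :=
    (PySem.List.pyRange 0 n 1).filter (fun k =>
      decide ((PySem.List.pyGet? adjacency_matrix node).bind
        (fun row => PySem.List.pyGet? row k) = some 1))
  PySem.Set.equal (PySem.Set.ofList actual_neighbors) (PySem.Set.ofList (cgpA_expected rows cols i j))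

def check_grid_pattern (adjacency_matrix : List (List Int)) (rows : Int) (cols : Int) : Bool :=
  let n := rows * cols
  if n ≠ (adjacency_matrix.length : Int) then false
  else
    -- nested loops with early 'return False' = .all over both ranges
    (PySem.List.pyRange 0 rows 1).all (fun i =>
      (PySem.List.pyRange 0 cols 1).all (fun j => cgpA_node adjacency_matrix rows cols i j))

-- ===== PORT B =====
-- B's per-node check: decode node a with divmod, scan its row cell by cell
def cgpB_node (adjacency_matrix : List (List Int)) (rows : Int) (cols : Int) (a : Int) : Bool :=
  let n := rows * cols
  let ra := PySem.Int.floordiv a cols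
  let ca := PySem.Int.mod a cols
  let rowv := PySem.List.pyGet? adjacency_matrix a
  (PySem.List.pyRange 0 n 1).all (fun b =>
    let rb := PySem.Int.floordiv b cols
    let cb := PySem.Int.mod b cols
    decide (rowv.bind (fun row => PySem.List.pyGet? row b) = some 1)
      == decide ((ra - rb).natAbs + (ca - cb).natAbs = 1))

def check_grid_pattern_alt (adjacency_matrix : List (List Int)) (rows : Int) (cols : Int) : Bool :=
  let n := rows * cols
  if n ≠ (adjacency_matrix.length : Int) then false
  else
    (PySem.List.pyRange 0 n 1).all (fun a => cgpB_node adjacency_matrix rows cols a)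

-- ===== PRECONDITION & SPEC =====
-- Pre_ excludes (a) ragged matrices with rows*cols = len on which A's row indexing can raise
-- IndexError (on some of these A still returns False via an earlier mismatch — see cites), and
-- (b) nonempty matrices with both dimensions negative, where A's vacuous True (both range() loops
-- are empty) is an accident of Python's range semantics no caller would specify.
def Pre_check_grid_pattern (adjacency_matrix : List (List Int)) (rows : Int) (cols : Int) : Prop :=
  rows * cols ≠ (adjacency_matrix.length : Int) ∨ adjacency_matrix = [] ∨
    (0 ≤ rows ∧ 0 ≤ cols ∧ ∀ row ∈ adjacency_matrix, rows * cols ≤ (row.length : Int))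
instance (adjacency_matrix : List (List Int)) (rows : Int) (cols : Int) : Decidable (Pre_check_grid_pattern adjacency_matrix rows cols) := by unfold Pre_check_grid_pattern; infer_instance
def pvWitness_check_grid_pattern : List (List Int) × Int × Int := ([[0, 1], [1, 0]], 1, 2)
def Spec_check_grid_pattern (adjacency_matrix : List (List Int)) (rows : Int) (cols : Int) (out : Bool) : Prop := out = check_grid_pattern_alt adjacency_matrix rows cols
instance (adjacency_matrix : List (List Int)) (rows : Int) (cols : Int) (out : Bool) : Decidable (Spec_check_grid_pattern adjacency_matrix rows cols out) := by unfold Spec_check_grid_pattern; infer_instance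

-- ===== CLAIM (what is proved, stated in full; the proofs are below) =====
def Claim_equal_check_grid_pattern : Prop := ∀ (adjacency_matrix : List (List Int)) (rows : Int) (cols : Int), Dom_check_grid_pattern adjacency_matrix rows cols → Pre_check_grid_pattern adjacency_matrix rows cols → Spec_check_grid_pattern adjacency_matrix rows cols (check_grid_pattern adjacency_matrix rows cols)

-- ===== LEMMAS AND PROOFS =====

-- uniqueness of quotient/remainder
theorem cgp_div_unique (cols q r q' r' : Int) (h0 : 0 < cols)
    (hr : 0 ≤ r) (hr2 : r < cols) (hs : 0 ≤ r') (hs2 : r' < cols)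
    (h : q * cols + r = q' * cols + r') : q = q' ∧ r = r' := by
  rcases lt_trichotomy q q' with hlt | heq | hgt
  · exfalso
    nlinarith [mul_le_mul_of_nonneg_right (show q + 1 ≤ q' by omega) (le_of_lt h0)]
  · subst heq; exact ⟨rfl, by linarith⟩
  · exfalso
    nlinarith [mul_le_mul_of_nonneg_right (show q' + 1 ≤ q by omega) (le_of_lt h0)]

-- divmod facts for 0 ≤ k < rows*cols, cols > 0
theorem cgp_divmod_facts (rows cols k : Int) (hc : 0 < cols)
    (hk0 : 0 ≤ k) (hk1 : k < rows * cols) :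
    PySem.Int.floordiv k cols * cols + PySem.Int.mod k cols = k ∧
    0 ≤ PySem.Int.mod k cols ∧ PySem.Int.mod k cols < cols ∧
    0 ≤ PySem.Int.floordiv k cols ∧ PySem.Int.floordiv k cols < rows := by
  have heq := PySem.Int.floordiv_mul_add_mod k cols
  have hm0 := PySem.Int.mod_nonneg k hc
  have hm1 := PySem.Int.mod_lt k hc
  refine ⟨heq, hm0, hm1, ?_, ?_⟩
  · by_contra hneg
    push_neg at hneg
    nlinarith [mul_le_mul_of_nonneg_right (show PySem.Int.floordiv k cols + 1 ≤ 0 by omega) (le_of_lt hc)]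
  · by_contra hbig
    push_neg at hbig
    nlinarith [mul_le_mul_of_nonneg_right hbig (le_of_lt hc)]

-- floordiv/mod of i*cols + j when 0 ≤ j < cols
theorem cgp_decode (cols i j : Int) (hc : 0 < cols) (hj0 : 0 ≤ j) (hj1 : j < cols) :
    PySem.Int.floordiv (i * cols + j) cols = i ∧ PySem.Int.mod (i * cols + j) cols = j := by
  have heq := PySem.Int.floordiv_mul_add_mod (i * cols + j) cols
  have hm0 := PySem.Int.mod_nonneg (i * cols + j) hc
  have hm1 := PySem.Int.mod_lt (i * cols + j) hc
  exact cgp_div_unique cols _ _ i j hc hm0 hm1 hj0 hj1 (by linarith)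

-- the neighbor condition A's expected list describes
def cgpQ (rows cols i j x : Int) : Prop :=
  (x = (i - 1) * cols + j ∧ i > 0) ∨ (x = (i + 1) * cols + j ∧ i < rows - 1) ∨
  (x = i * cols + (j - 1) ∧ j > 0) ∨ (x = i * cols + (j + 1) ∧ j < cols - 1)

theorem mem_cgpA_expected (rows cols i j x : Int) :
    x ∈ cgpA_expected rows cols i j ↔ cgpQ rows cols i j x := by
  unfold cgpA_expected cgpQ
  by_cases h1 : i > 0 <;> by_cases h2 : i < rows - 1 <;>
    by_cases h3 : j > 0 <;> by_cases h4 : j < cols - 1 <;>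
    simp [h1, h2, h3, h4]

-- every expected neighbor lies in [0, rows*cols)
theorem cgpQ_bound (rows cols i j x : Int)
    (hi0 : 0 ≤ i) (hi1 : i < rows) (hj0 : 0 ≤ j) (hj1 : j < cols)
    (hx : cgpQ rows cols i j x) : 0 ≤ x ∧ x < rows * cols := by
  have hc0 : (0:Int) ≤ cols := le_of_lt (lt_of_le_of_lt hj0 hj1)
  rcases hx with ⟨rfl, h⟩ | ⟨rfl, h⟩ | ⟨rfl, h⟩ | ⟨rfl, h⟩
  · exact ⟨by nlinarith [mul_nonneg (show (0:Int) ≤ i - 1 by omega) hc0],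
      by nlinarith [mul_le_mul_of_nonneg_right (show i - 1 ≤ rows - 1 by omega) hc0]⟩
  · exact ⟨by nlinarith [mul_nonneg (show (0:Int) ≤ i + 1 by omega) hc0],
      by nlinarith [mul_le_mul_of_nonneg_right (show i + 1 ≤ rows - 1 by omega) hc0]⟩
  · exact ⟨by nlinarith [mul_nonneg hi0 hc0],
      by nlinarith [mul_le_mul_of_nonneg_right (show i ≤ rows - 1 by omega) hc0]⟩
  · exact ⟨by nlinarith [mul_nonneg hi0 hc0],
      by nlinarith [mul_le_mul_of_nonneg_right (show i ≤ rows - 1 by omega) hc0]⟩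

-- B's Manhattan-distance-1 test coincides with A's neighbor condition on [0, rows*cols)
theorem cgp_manhattan_iff (rows cols i j k : Int) (hc : 0 < cols)
    (hi0 : 0 ≤ i) (hi1 : i < rows) (hj0 : 0 ≤ j) (hj1 : j < cols)
    (hk0 : 0 ≤ k) (hk1 : k < rows * cols) :
    ((i - PySem.Int.floordiv k cols).natAbs + (j - PySem.Int.mod k cols).natAbs = 1)
      ↔ cgpQ rows cols i j k := by
  obtain ⟨heq, hm0, hm1, hq0, hq1⟩ := cgp_divmod_facts rows cols k hc hk0 hk1
  set q := PySem.Int.floordiv k cols with hq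
  set r := PySem.Int.mod k cols with hr
  constructor
  · intro h
    have hcases : (q = i - 1 ∧ r = j ∧ 0 < i) ∨ (q = i + 1 ∧ r = j ∧ i < rows - 1) ∨
        (q = i ∧ r = j - 1 ∧ 0 < j) ∨ (q = i ∧ r = j + 1 ∧ j < cols - 1) := by omega
    unfold cgpQ
    rcases hcases with ⟨h1, h2, h3⟩ | ⟨h1, h2, h3⟩ | ⟨h1, h2, h3⟩ | ⟨h1, h2, h3⟩
    · exact Or.inl ⟨by rw [h1, h2] at heq; linarith, h3⟩
    · exact Or.inr (Or.inl ⟨by rw [h1, h2] at heq; linarith, h3⟩)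
    · exact Or.inr (Or.inr (Or.inl ⟨by rw [h1, h2] at heq; linarith, h3⟩))
    · exact Or.inr (Or.inr (Or.inr ⟨by rw [h1, h2] at heq; linarith, h3⟩))
  · intro h
    rcases h with ⟨h1, h2⟩ | ⟨h1, h2⟩ | ⟨h1, h2⟩ | ⟨h1, h2⟩
    · obtain ⟨e1, e2⟩ := cgp_div_unique cols q r (i - 1) j hc hm0 hm1 hj0 hj1 (by linarith [heq, h1.symm ▸ heq]; )
      omega
    · obtain ⟨e1, e2⟩ := cgp_div_unique cols q r (i + 1) j hc hm0 hm1 hj0 hj1 (by linarith [heq, h1.symm ▸ heq])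
      omega
    · obtain ⟨e1, e2⟩ := cgp_div_unique cols q r i (j - 1) hc hm0 hm1 (by omega) (by omega) (by linarith [heq, h1.symm ▸ heq])
      omega
    · obtain ⟨e1, e2⟩ := cgp_div_unique cols q r i (j + 1) hc hm0 hm1 (by omega) (by omega) (by linarith [heq, h1.symm ▸ heq])
      omega

-- the two per-node checks agree at node i*cols + j
theorem cgp_node_eq (m : List (List Int)) (rows cols i j : Int)
    (hi0 : 0 ≤ i) (hi1 : i < rows) (hj0 : 0 ≤ j) (hj1 : j < cols) :
    cgpA_node m rows cols i j = cgpB_node m rows cols (i * cols + j) := by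
  have hc : 0 < cols := lt_of_le_of_lt hj0 hj1
  obtain ⟨hfd, hmd⟩ := cgp_decode cols i j hc hj0 hj1
  unfold cgpA_node cgpB_node
  simp only [hfd, hmd]
  rw [Bool.eq_iff_iff]
  rw [PySem.Set.equal_iff, List.all_eq_true]
  simp only [PySem.Set.mem_ofList, List.mem_filter, PySem.List.mem_pyRange_one,
    beq_iff_eq, decide_eq_decide, decide_eq_true_eq, mem_cgpA_expected]
  constructor
  · intro h k hk
    rw [cgp_manhattan_iff rows cols i j k hc hi0 hi1 hj0 hj1 hk.1 hk.2]
    have hx := h k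
    exact ⟨fun hp => hx.mp ⟨hk, hp⟩, fun hq => (hx.mpr hq).2⟩
  · intro h x
    constructor
    · rintro ⟨hk, hp⟩
      have := (h x hk).mp hp
      rwa [cgp_manhattan_iff rows cols i j x hc hi0 hi1 hj0 hj1 hk.1 hk.2] at this
    · intro hq
      have hb := cgpQ_bound rows cols i j x hi0 hi1 hj0 hj1 hq
      refine ⟨hb, ?_⟩
      rw [h x hb, cgp_manhattan_iff rows cols i j x hc hi0 hi1 hj0 hj1 hb.1 hb.2]
      exact hq

-- A's double (i, j) loop equals B's single loop over nodes (row-major bijection)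
theorem cgp_double_loop (rows cols : Int) (hc : 0 < cols) (f : Int → Bool) :
    ((PySem.List.pyRange 0 rows 1).all (fun i =>
      (PySem.List.pyRange 0 cols 1).all (fun j => f (i * cols + j)))) =
    (PySem.List.pyRange 0 (rows * cols) 1).all f := by
  rw [Bool.eq_iff_iff]
  simp only [List.all_eq_true, PySem.List.mem_pyRange_one]
  constructor
  · intro h a ha
    obtain ⟨heq, hm0, hm1, hq0, hq1⟩ := cgp_divmod_facts rows cols a hc ha.1 ha.2
    have := h _ ⟨hq0, hq1⟩ _ ⟨hm0, hm1⟩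
    rwa [heq] at this
  · intro h i hi j hj
    apply h
    constructor
    · nlinarith [mul_nonneg hi.1 (le_of_lt hc)]
    · nlinarith [mul_le_mul_of_nonneg_right (show i ≤ rows - 1 by omega) (le_of_lt hc)]

-- congruence for .all
theorem pv_all_congr {α : Type} (l : List α) (p q : α → Bool)
    (h : ∀ x ∈ l, p x = q x) : l.all p = l.all q := by
  induction l with
  | nil => rfl
  | cons a t ih =>
    simp only [List.all_cons]
    rw [h a (by simp), ih (fun x hx => h x (by simp [hx]))]

-- ===== VERDICT (by name: the statement is the Claim_ definition above) =====
theorem check_grid_pattern_spec : Claim_equal_check_grid_pattern := by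
  intro m rows cols _ hpre
  unfold Spec_check_grid_pattern check_grid_pattern check_grid_pattern_alt
  by_cases hguard : rows * cols ≠ (m.length : Int)
  · simp [hguard]
  · simp only [hguard, if_false]
    push_neg at hguard
    by_cases hrc : 0 < rows ∧ 0 < cols
    · obtain ⟨hr, hc⟩ := hrc
      rw [← cgp_double_loop rows cols hc (cgpB_node m rows cols)]
      apply pv_all_congr
      intro i hi
      apply pv_all_congr
      intro j hj
      rw [PySem.List.mem_pyRange_one] at hi hj
      exact cgp_node_eq m rows cols i j hi.1 hi.2 hj.1 hj.2
    · -- degenerate grid: rows ≤ 0 or cols ≤ 0; with Pre_ this forces rows * cols = 0,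
      -- so A's loops and B's loop are all empty and both sides are true
      have hdeg : rows ≤ 0 ∨ cols ≤ 0 := by
        by_contra hcon
        push_neg at hcon
        exact hrc ⟨by omega, by omega⟩
      have hn0 : rows * cols = 0 := by
        rcases hpre with h | h | ⟨h1, h2, _⟩
        · exact (h hguard).elim
        · rw [h] at hguard
          simpa using hguard
        · rcases hdeg with hd | hd
          · have h0 : rows = 0 := le_antisymm hd h1
            simp [h0]
          · have h0 : cols = 0 := le_antisymm hd h2
            simp [h0]
      have hrange : PySem.List.pyRange 0 (rows * cols) 1 = [] := by
        rw [hn0, PySem.List.pyRange_one]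
        simp
      rcases mul_eq_zero.mp hn0 with h | h
      · have hrows : PySem.List.pyRange 0 rows 1 = [] := by
          rw [h, PySem.List.pyRange_one]
          simp
        simp [hrows, hrange]
      · have hcols : PySem.List.pyRange 0 cols 1 = [] := by
          rw [h, PySem.List.pyRange_one]
          simp
        simp [hcols, hrange]
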